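-- pv_equiv track=rewrite | github.com/bighousevn/Rag_Graph_LawLaw | version_2/1_gen_data_for_graph.py | chunk_data_with_ids
-- ===== SOURCE A (Python) =====
-- def chunk_data_with_ids(data, chunk_size=15):
--     chunks = []
--     for i in range(0, len(data), chunk_size):
--         chunk_items = data[i:i + chunk_size]
--         text_chunk = ""
--         for item in chunk_items:
--             sid = item.get("section_id", "unknown")
--             text = item.get("original_text", "")
--             text_chunk += f"[SID: {sid}] {text}\n"
--         chunks.append(text_chunk)
--     return chunks
-- ===== SOURCE B (Python) =====
-- def chunk_data_with_ids(data, chunk_size=15):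
--     if chunk_size <= 0:
--         raise ValueError("chunk_size must be a positive integer")
--     chunks = []
--     buf = []
--     for item in data:
--         sid = item.get("section_id", "unknown")
--         text = item.get("original_text", "")
--         buf.append(f"[SID: {sid}] {text}\n")
--         if len(buf) == chunk_size:
--             chunks.append("".join(buf))
--             buf = []
--     if buf:
--         chunks.append("".join(buf))
--     return chunks
-- ===== Notes on version B (the rewrite author's own statement) =====
-- stated objective: alternative
-- what changed: Replaces A's index/slice outer loop (slice a window, then an inner formatting loop per window) by a single streaming pass over the items that formats each item once into a buffer and flushes the buffer as a chunk whenever it reaches chunk_size, with a final flush.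
-- outside the precondition, e.g. on chunk_data_with_ids([{'section_id': 'a'}], -1): A returns [], B raises ValueError; on chunk_data_with_ids([], 0): A raises ValueError, B raises ValueError
import Mathlib
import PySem

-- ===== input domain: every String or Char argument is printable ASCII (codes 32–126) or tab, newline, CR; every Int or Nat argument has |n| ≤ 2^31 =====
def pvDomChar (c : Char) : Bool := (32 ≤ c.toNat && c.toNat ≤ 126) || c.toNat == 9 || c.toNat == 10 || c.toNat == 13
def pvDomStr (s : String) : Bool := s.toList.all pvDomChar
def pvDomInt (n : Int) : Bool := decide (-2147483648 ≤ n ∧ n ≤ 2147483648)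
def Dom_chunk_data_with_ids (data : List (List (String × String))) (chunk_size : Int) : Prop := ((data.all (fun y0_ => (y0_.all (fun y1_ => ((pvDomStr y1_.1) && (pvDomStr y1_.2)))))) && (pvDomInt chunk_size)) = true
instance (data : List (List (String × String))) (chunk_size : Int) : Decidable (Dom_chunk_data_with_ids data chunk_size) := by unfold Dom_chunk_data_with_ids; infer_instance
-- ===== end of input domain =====

-- B replaces A's slice-then-format nested loops by one streaming pass with a buffer flushed at chunk_size (B raises on chunk_size <= 0, excluded by Pre_); same output on Pre_, same cost.


-- ===== PORT A =====
def chunk_data_with_ids (data : List (List (String × String))) (chunk_size : Int) : List String :=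
  (PySem.List.pyRange 0 (data.length : Int) chunk_size).foldl (fun chunks i =>
    let chunk_items := PySem.List.slice data (some i) (some (i + chunk_size))
    let text_chunk := chunk_items.foldl (fun acc item =>
      let sid := PySem.Dict.getD (PySem.Dict.mk item) "section_id" "unknown"
      let text := PySem.Dict.getD (PySem.Dict.mk item) "original_text" ""
      acc ++ "[SID: " ++ sid ++ "] " ++ text ++ "\n") ""
    chunks ++ [text_chunk]) []

-- ===== PORT B =====
def pvLine (item : List (String × String)) : String :=
  "[SID: " ++ PySem.Dict.getD (PySem.Dict.mk item) "section_id" "unknown" ++ "] "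
    ++ PySem.Dict.getD (PySem.Dict.mk item) "original_text" "" ++ "\n"

def chunk_data_with_ids_alt (data : List (List (String × String))) (chunk_size : Int) : List String :=
  if chunk_size ≤ 0 then []   -- Python B raises ValueError here; outside Pre_, nothing is claimed
  else
    let st := data.foldl (fun (st : List String × List String) item =>
      let buf := st.2 ++ [pvLine item]
      if (buf.length : Int) = chunk_size then (st.1 ++ [PySem.Str.join "" buf], [])
      else (st.1, buf)) ([], [])
    if st.2.isEmpty then st.1 else st.1 ++ [PySem.Str.join "" st.2]

-- ===== PRECONDITION & SPEC =====
-- Pre_ excludes chunk_size ≤ 0: at 0 both A and B raise ValueError; on negative chunk_size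
-- A's range(0, n, negative) is empty so A returns [], while the streaming B raises ValueError there.
def Pre_chunk_data_with_ids (data : List (List (String × String))) (chunk_size : Int) : Prop := 1 ≤ chunk_size
instance (data : List (List (String × String))) (chunk_size : Int) : Decidable (Pre_chunk_data_with_ids data chunk_size) := by unfold Pre_chunk_data_with_ids; infer_instance
def pvWitness_chunk_data_with_ids : (List (List (String × String))) × Int :=
  ([[("section_id", "s1"), ("original_text", "hello")], [("original_text", "x")], []], 2)
def Spec_chunk_data_with_ids (data : List (List (String × String))) (chunk_size : Int) (out : List String) : Prop := out = chunk_data_with_ids_alt data chunk_size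
instance (data : List (List (String × String))) (chunk_size : Int) (out : List String) : Decidable (Spec_chunk_data_with_ids data chunk_size out) := by unfold Spec_chunk_data_with_ids; infer_instance

-- ===== CLAIM (what is proved, stated in full; the proofs are below) =====
def Claim_equal_chunk_data_with_ids : Prop := ∀ (data : List (List (String × String))) (chunk_size : Int), Dom_chunk_data_with_ids data chunk_size → Pre_chunk_data_with_ids data chunk_size → Spec_chunk_data_with_ids data chunk_size (chunk_data_with_ids data chunk_size)

-- ===== LEMMAS AND PROOFS =====

-- reference chunking: split L into blocks of n+1 lines, each joined
def pvChunksOf (n : Nat) (L : List String) : List String :=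
  if h : L = [] then [] else
    PySem.Str.join "" (L.take (n+1)) :: pvChunksOf n (L.drop (n+1))
termination_by L.length
decreasing_by simp_all [List.length_drop]; exact List.length_pos_of_ne_nil h

-- "".join splits off its first element
theorem pv_join_cons (l : String) (ls : List String) :
    PySem.Str.join "" (l :: ls) = l ++ PySem.Str.join "" ls := by
  cases ls with
  | nil => simp [PySem.Str.join, PySem.Chars.join, List.intercalate]
  | cons m ms => simp [PySem.Str.join, PySem.Chars.join_cons_cons]

-- slice commutes with map
theorem pv_slice_map (xs : List (List (String × String))) (a b : Int) :
    PySem.List.slice (xs.map pvLine) (some a) (some b)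
      = (PySem.List.slice xs (some a) (some b)).map pvLine := by
  simp [PySem.List.slice, List.map_drop, List.map_take]

-- A's inner string-building fold is the join of the mapped lines
theorem pv_inner (xs : List (List (String × String))) (acc : String) :
    xs.foldl (fun acc item =>
      acc ++ "[SID: " ++ PySem.Dict.getD (PySem.Dict.mk item) "section_id" "unknown" ++ "] "
        ++ PySem.Dict.getD (PySem.Dict.mk item) "original_text" "" ++ "\n") acc
      = acc ++ PySem.Str.join "" (xs.map pvLine) := by
  induction xs generalizing acc with
  | nil => simp [PySem.Str.join, PySem.Chars.join, List.intercalate]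
  | cons x xs ih =>
      simp only [List.foldl_cons, List.map_cons, ih, pv_join_cons]
      simp [pvLine, String.append_assoc]

-- range with positive step peels its first element
theorem pv_range_cons (a b s : Int) (hs : 0 < s) (hab : a < b) :
    PySem.List.pyRange a b s = a :: PySem.List.pyRange (a+s) b s := by
  rw [PySem.List.pyRange_of_pos _ _ hs, PySem.List.pyRange_of_pos _ _ hs]
  have key : (if a < b then ((b - a + s - 1) / s).toNat else 0)
      = (if a + s < b then ((b - (a+s) + s - 1) / s).toNat else 0) + 1 := by
    rw [if_pos hab]
    by_cases h : a + s < b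
    · rw [if_pos h]
      have h1 : (b - a + s - 1) / s = (b - (a+s) + s - 1) / s + 1 := by
        have := Int.add_mul_ediv_right (b - (a+s) + s - 1) 1 hs.ne'
        rw [← this]; ring_nf
      have h2 : 0 ≤ (b - (a+s) + s - 1) / s :=
        Int.ediv_nonneg (by omega) hs.le
      omega
    · rw [if_neg h]
      have h1 : 1 ≤ (b - a + s - 1) / s := by
        rw [Int.le_ediv_iff_mul_le hs]; omega
      have h2 : (b - a + s - 1) / s < 2 := by
        rw [Int.ediv_lt_iff_lt_mul hs]; omega
      omega
  rw [key, List.range_succ_eq_map, List.map_cons, List.map_map]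
  congr 1
  · simp
  · exact List.map_congr_left (fun k _ => by simp [Function.comp]; ring)

-- range starting at its step is a shifted range starting at 0
theorem pv_range_shift (b s : Int) (hs : 0 < s) :
    PySem.List.pyRange s b s = (PySem.List.pyRange 0 (b - s) s).map (· + s) := by
  rw [PySem.List.pyRange_of_pos _ _ hs, PySem.List.pyRange_of_pos _ _ hs, List.map_map]
  rw [show b - s - 0 + s - 1 = b - s + s - 1 by ring]
  by_cases h : s < b
  · rw [if_pos h, if_pos (by omega : 0 < b - s)]
    exact List.map_congr_left (fun k _ => by simp [Function.comp]; ring)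
  · rw [if_neg h, if_neg (by omega : ¬ 0 < b - s)]
    simp

-- A's per-window map over the stepped range is the reference chunking
theorem pv_A_eq (n : Nat) (L : List String) :
    (PySem.List.pyRange 0 (L.length : Int) ((n : Int)+1)).map
      (fun i => PySem.Str.join "" (PySem.List.slice L (some i) (some (i + ((n : Int)+1)))))
      = pvChunksOf n L := by
  by_cases hL : L = []
  · subst hL
    simp [PySem.List.pyRange_of_pos 0 0 (by omega : (0:Int) < (n:Int)+1), pvChunksOf]
  · have hs : (0:Int) < (n:Int)+1 := by omega
    have hlen : (0:Int) < (L.length : Int) := by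
      have := List.length_pos_of_ne_nil hL; omega
    rw [pv_range_cons 0 _ _ hs hlen, List.map_cons, Int.zero_add,
        pv_range_shift _ _ hs, List.map_map]
    have hdrop : (PySem.List.pyRange 0 ((L.length : Int) - ((n:Int)+1)) ((n:Int)+1))
        = PySem.List.pyRange 0 ((L.drop (n+1)).length : Int) ((n:Int)+1) := by
      by_cases h : (n:Int)+1 ≤ (L.length : Int)
      · congr 1; simp [List.length_drop]; omega
      · rw [PySem.List.pyRange_of_pos _ _ hs, PySem.List.pyRange_of_pos _ _ hs]
        have : ¬ ((0:Int) < (L.length : Int) - ((n:Int)+1)) := by omega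
        have h2 : ¬ ((0:Int) < ((L.drop (n+1)).length : Int)) := by
          simp [List.length_drop]; omega
        rw [if_neg this, if_neg h2]
    rw [hdrop]
    have hcongr : ∀ i ∈ PySem.List.pyRange 0 ((L.drop (n+1)).length : Int) ((n:Int)+1),
        ((fun i => PySem.Str.join "" (PySem.List.slice L (some i) (some (i + ((n:Int)+1))))) ∘ (· + ((n:Int)+1))) i
        = PySem.Str.join "" (PySem.List.slice (L.drop (n+1)) (some i) (some (i + ((n:Int)+1)))) := by
      intro i hi
      have hi0 : 0 ≤ i := ((PySem.List.mem_pyRange_iff_of_pos hs i).1 hi).1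
      simp only [Function.comp]
      congr 1
      rw [PySem.List.slice_toNat _ (by omega) (by omega),
          PySem.List.slice_toNat _ (by omega) (by omega), List.drop_drop]
      congr 1
      · omega
      · congr 1; omega
    rw [List.map_congr_left hcongr, pv_A_eq n (L.drop (n+1))]
    conv_rhs => rw [pvChunksOf]
    rw [dif_neg hL]
    congr 1
    rw [PySem.List.slice_zero_start, PySem.List.slice_to _ (by omega)]
    congr 2
termination_by L.length
decreasing_by simp [List.length_drop]; exact List.length_pos_of_ne_nil hL

-- B's streaming fold with a partial buffer produces the reference chunking of buffer ++ rest
theorem pv_B_eq (n : Nat) (ds : List (List (String × String))) (cs buf : List String)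
    (hbuf : buf.length < n + 1) :
    (let st := ds.foldl (fun (st : List String × List String) item =>
        let b := st.2 ++ [pvLine item]
        if (b.length : Int) = ((n:Int)+1) then (st.1 ++ [PySem.Str.join "" b], [])
        else (st.1, b)) (cs, buf)
     if st.2.isEmpty then st.1 else st.1 ++ [PySem.Str.join "" st.2])
      = cs ++ pvChunksOf n (buf ++ ds.map pvLine) := by
  induction ds generalizing cs buf with
  | nil =>
      simp only [List.foldl_nil, List.map_nil, List.append_nil]
      by_cases h : buf = []
      · subst h; simp [pvChunksOf]
      · rw [pvChunksOf, dif_neg h]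
        have h1 : buf.take (n+1) = buf := List.take_of_length_le (by omega)
        have h2 : buf.drop (n+1) = [] := List.drop_of_length_le (by omega)
        simp [h, h1, h2, pvChunksOf]
  | cons d ds ih =>
      simp only [List.foldl_cons, List.map_cons]
      have hfull : buf ++ pvLine d :: ds.map pvLine
          = (buf ++ [pvLine d]) ++ ds.map pvLine := by simp
      by_cases h : ((buf ++ [pvLine d]).length : Int) = ((n:Int)+1)
      · have hlen : (buf ++ [pvLine d]).length = n + 1 := by omega
        rw [if_pos h, ih _ [] (by simp), hfull]
        conv_rhs => rw [pvChunksOf]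
        rw [dif_neg (by simp)]
        rw [List.take_append_of_le_length (by omega), List.take_of_length_le (by omega),
            List.drop_append_of_le_length (by omega), List.drop_of_length_le (by omega)]
        simp
      · rw [if_neg h, ih cs (buf ++ [pvLine d])
          (by simp only [List.length_append, List.length_cons, List.length_nil] at h ⊢; omega), hfull]

-- ===== VERDICT (by name: the statement is the Claim_ definition above) =====
theorem chunk_data_with_ids_spec : Claim_equal_chunk_data_with_ids := by
  intro data chunk_size _ hpre
  obtain ⟨n, rfl⟩ : ∃ n : Nat, chunk_size = (n:Int) + 1 :=
    ⟨(chunk_size - 1).toNat, by unfold Pre_chunk_data_with_ids at hpre; omega⟩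
  unfold Spec_chunk_data_with_ids chunk_data_with_ids chunk_data_with_ids_alt
  rw [if_neg (by omega)]
  rw [PySem.List.foldl_append_singleton_eq_map, List.nil_append]
  have hA : (PySem.List.pyRange 0 (data.length : Int) ((n:Int)+1)).map
      (fun i => (PySem.List.slice data (some i) (some (i + ((n:Int)+1)))).foldl (fun acc item =>
        acc ++ "[SID: " ++ PySem.Dict.getD (PySem.Dict.mk item) "section_id" "unknown" ++ "] "
          ++ PySem.Dict.getD (PySem.Dict.mk item) "original_text" "" ++ "\n") "")
      = pvChunksOf n (data.map pvLine) := by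
    rw [← pv_A_eq n (data.map pvLine)]
    simp only [List.length_map]
    exact List.map_congr_left (fun i _ => by
      rw [pv_inner, pv_slice_map]; simp)
  have hB := pv_B_eq n data [] [] (by simp)
  simp only [List.nil_append] at hB
  rw [hB]
  exact hA
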